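-- pv_equiv track=rewrite | github.com/Kalpan13/Twins-Testing-on-DiemBFT | test_generator.py | generate_partition_configs
-- ===== SOURCE A (Python) =====
-- import copy
--
-- def generate_partition_configs(nodes, no_of_partitions):
--     if no_of_partitions == 1:
--         return [[nodes]]
--
--     if len(nodes) == no_of_partitions:
--         return [[[node] for node in nodes]]
--
--     partition_config_without_current_node = generate_partition_configs(nodes[:-1], no_of_partitions)
--     all_possible_partitions = generate_partition_configs(nodes[:-1], no_of_partitions - 1)
--
--     for i in range(len(all_possible_partitions)):
--         all_possible_partitions[i].append([nodes[-1]])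
--
--     for i in range(len(partition_config_without_current_node)):
--         for j in range(len(partition_config_without_current_node[i])):
--             current_partition = copy.deepcopy(partition_config_without_current_node[i])
--             current_partition[j].append(nodes[-1])
--             all_possible_partitions.append(current_partition)
--
--     return all_possible_partitions
-- ===== SOURCE B (Python) =====
-- def generate_partition_configs(nodes, no_of_partitions):
--     # Bottom-up DP over prefixes instead of two-way recursion; keeps only the previous row.
--     if no_of_partitions == 1:
--         return [[list(nodes)]]
--     k = no_of_partitions
--     n = len(nodes)
--     prev = []  # prev[j-1] = all partitions of nodes[:i] into j blocks, in A's order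
--     for i in range(1, n + 1):
--         row = []
--         for j in range(1, min(i, k) + 1):
--             if j == 1:
--                 cell = [[nodes[:i]]]
--             elif j == i:
--                 cell = [[[x] for x in nodes[:i]]]
--             else:
--                 cell = [p + [[nodes[i - 1]]] for p in prev[j - 2]]
--                 for p in prev[j - 1]:
--                     for b in range(len(p)):
--                         q = [list(blk) for blk in p]
--                         q[b].append(nodes[i - 1])
--                         cell.append(q)
--             row.append(cell)
--         prev = row
--     return prev[k - 1]
-- ===== Notes on version B (the rewrite author's own statement) =====
-- stated objective: alternative
-- what changed: Replaces A's top-down two-way recursion (which recomputes subproblems exponentially often) with a bottom-up DP over prefix lengths that keeps only the previous row of cells, filling each cell in A's exact append order. Pre_ excludes the inputs where A's recursion never terminates (RecursionError) and the degenerate ([], 0) where A's accidental base-case value [[]] ('zero blocks') is an artefact of checking len(nodes)==no_of_partitions; B naturally raises there.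
-- outside the precondition, e.g. on generate_partition_configs([], 0): A returns [[]], B raises IndexError
import Mathlib
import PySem

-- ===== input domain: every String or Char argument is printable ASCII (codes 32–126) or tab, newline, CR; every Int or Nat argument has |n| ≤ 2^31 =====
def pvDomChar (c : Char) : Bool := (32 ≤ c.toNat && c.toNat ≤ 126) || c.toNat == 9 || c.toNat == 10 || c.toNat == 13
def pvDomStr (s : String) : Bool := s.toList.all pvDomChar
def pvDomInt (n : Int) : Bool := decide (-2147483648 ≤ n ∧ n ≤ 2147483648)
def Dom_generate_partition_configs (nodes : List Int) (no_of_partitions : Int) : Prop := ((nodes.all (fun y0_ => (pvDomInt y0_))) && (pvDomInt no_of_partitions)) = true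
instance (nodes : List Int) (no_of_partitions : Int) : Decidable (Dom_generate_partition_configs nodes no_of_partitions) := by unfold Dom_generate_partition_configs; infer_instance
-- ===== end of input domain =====

-- B replaces A's two-way recursion by a bottom-up DP over prefixes that keeps only the previous row (objective: alternative decomposition; return value only, no mutation visible to the caller).

-- ===== PORT A =====
-- literal transliteration of A's recursion; on nodes = [] with no_of_partitions ∉ {0,1}
-- Python recurses forever (RecursionError), excluded by Pre_; the port returns [] there.
def generate_partition_configs (nodes : List Int) (no_of_partitions : Int) : List (List (List Int)) :=
  if no_of_partitions = 1 then [[nodes]]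
  else if (nodes.length : Int) = no_of_partitions then [nodes.map (fun node => [node])]
  else if h : nodes = [] then []
  else
    let without := generate_partition_configs nodes.dropLast no_of_partitions
    let allp := generate_partition_configs nodes.dropLast (no_of_partitions - 1)
    let last := nodes.getLast h
    -- first loop: append a new singleton block to every partition of allp
    -- second (nested) loop: for each partition and each block index, a deep copy with last appended to that block
    (allp.map (fun p => p ++ [[last]])) ++
      without.flatMap (fun p => (List.range p.length).map (fun j => p.set j ((p.getD j []) ++ [last])))
termination_by nodes.length
decreasing_by
  all_goals
    simp only [List.length_dropLast]
    have : nodes.length ≠ 0 := by simpa using h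
    omega

-- ===== PORT B =====
-- one DP step: from the row for prefix length i-1 build the row for prefix length i
def pvRow (nodes : List Int) (k : Int) (prev : List (List (List (List Int)))) (i : Nat) :
    List (List (List (List Int))) :=
  (List.range' 1 (min i k.toNat)).map (fun j =>
    if j = 1 then [[nodes.take i]]
    else if j = i then [(nodes.take i).map (fun x => [x])]
    else
      let last := nodes.getD (i - 1) 0
      ((prev.getD (j - 2) []).map (fun p => p ++ [[last]])) ++
        (prev.getD (j - 1) []).flatMap (fun p =>
          (List.range p.length).map (fun b => p.set b ((p.getD b []) ++ [last]))))

def generate_partition_configs_alt (nodes : List Int) (no_of_partitions : Int) : List (List (List Int)) :=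
  if no_of_partitions = 1 then [[nodes]]
  else
    ((List.range' 1 nodes.length).foldl (pvRow nodes no_of_partitions) []).getD
      (no_of_partitions.toNat - 1) []

-- ===== PRECONDITION & SPEC =====
-- Pre_ excludes the inputs where A's recursion never terminates (RecursionError) and the
-- degenerate ([], 0), where A's accidental base-case value [[]] ('zero blocks') is an artefact
-- of checking len(nodes) == no_of_partitions; B naturally raises IndexError on all of them.
def Pre_generate_partition_configs (nodes : List Int) (no_of_partitions : Int) : Prop :=
  no_of_partitions = 1 ∨ (2 ≤ no_of_partitions ∧ no_of_partitions ≤ (nodes.length : Int))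
instance (nodes : List Int) (no_of_partitions : Int) : Decidable (Pre_generate_partition_configs nodes no_of_partitions) := by unfold Pre_generate_partition_configs; infer_instance
def pvWitness_generate_partition_configs : List Int × Int := ([1, 2, 3, 4], 2)

def Spec_generate_partition_configs (nodes : List Int) (no_of_partitions : Int) (out : List (List (List Int))) : Prop := out = generate_partition_configs_alt nodes no_of_partitions
instance (nodes : List Int) (no_of_partitions : Int) (out : List (List (List Int))) : Decidable (Spec_generate_partition_configs nodes no_of_partitions out) := by unfold Spec_generate_partition_configs; infer_instance

-- ===== CLAIM (what is proved, stated in full; the proofs are below) =====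
def Claim_equal_generate_partition_configs : Prop := ∀ (nodes : List Int) (no_of_partitions : Int), Dom_generate_partition_configs nodes no_of_partitions → Pre_generate_partition_configs nodes no_of_partitions → Spec_generate_partition_configs nodes no_of_partitions (generate_partition_configs nodes no_of_partitions)

-- ===== LEMMAS AND PROOFS =====

lemma A_one (nodes : List Int) : generate_partition_configs nodes 1 = [[nodes]] := by
  rw [generate_partition_configs]; simp

lemma A_base (nodes : List Int) (k : Int) (h1 : k ≠ 1) (h2 : (nodes.length : Int) = k) :
    generate_partition_configs nodes k = [nodes.map (fun node => [node])] := by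
  rw [generate_partition_configs]; simp [h1, h2]

lemma A_step (nodes : List Int) (k : Int) (h1 : k ≠ 1) (h2 : (nodes.length : Int) ≠ k)
    (h3 : nodes ≠ []) :
    generate_partition_configs nodes k =
      ((generate_partition_configs nodes.dropLast (k - 1)).map
          (fun p => p ++ [[nodes.getLast h3]])) ++
        (generate_partition_configs nodes.dropLast k).flatMap
          (fun p => (List.range p.length).map
            (fun j => p.set j ((p.getD j []) ++ [nodes.getLast h3]))) := by
  rw [generate_partition_configs]; simp [h1, h2, h3]

-- the value B's DP cell (i, j) is claimed to hold: A on the length-i prefix with j blocks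
def pvCell (nodes : List Int) (i j : Nat) : List (List (List Int)) :=
  generate_partition_configs (nodes.take i) (j : Int)

lemma take_dropLast (l : List Int) (i : Nat) (h : i + 1 ≤ l.length) :
    (l.take (i + 1)).dropLast = l.take i := by
  rw [List.dropLast_eq_take, List.length_take, List.take_take]
  congr 1
  omega

lemma getD_map_range' (f : Nat → List (List (List Int))) (m idx : Nat) (h : idx < m) :
    (((List.range' 1 m).map f).getD idx []) = f (1 + idx) := by
  rw [List.getD_eq_getElem _ _ (by simpa using h)]
  simp [List.getElem_range']

lemma row_inv (nodes : List Int) (k : Int) (hk : 2 ≤ k) :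
    ∀ i, i ≤ nodes.length →
      (List.range' 1 i).foldl (pvRow nodes k) [] =
        (List.range' 1 (min i k.toNat)).map (pvCell nodes i) := by
  intro i
  induction i with
  | zero => intro _; simp
  | succ i ih =>
    intro hle
    have hrec := List.range'_concat (s := 1) (n := i) (step := 1)
    simp only [one_mul] at hrec
    rw [hrec, List.foldl_append, ih (by omega), List.foldl_cons, List.foldl_nil]
    unfold pvRow
    simp only [show (1 : Nat) + i = i + 1 from by omega]
    apply List.map_congr_left
    intro j hj
    have hj' : 1 ≤ j ∧ j < 1 + min (i + 1) k.toNat := List.mem_range'_1.mp hj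
    have hjk : j ≤ k.toNat := by omega
    have hji : j ≤ i + 1 := by omega
    by_cases hj1 : j = 1
    · subst hj1
      simp [pvCell, A_one]
    · rw [if_neg hj1]
      by_cases hjtop : j = i + 1
      · subst hjtop
        rw [if_pos rfl]
        unfold pvCell
        have hlen : (nodes.take (i + 1)).length = i + 1 := by
          rw [List.length_take]; omega
        rw [A_base]
        · intro hc
          have : i + 1 = 1 := by exact_mod_cast hc
          omega
        · rw [hlen]
      · have h2j : 2 ≤ j := by omega
        have hjlt : j < i + 1 := by omega
        rw [if_neg hjtop]
        have hne : nodes.take (i + 1) ≠ [] :=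
          List.ne_nil_of_length_pos (by rw [List.length_take]; omega)
        unfold pvCell
        rw [A_step (nodes.take (i + 1)) (j : Int)
            (by intro hc; exact hj1 (by exact_mod_cast hc))
            (by simp; intro hc; omega)
            hne]
        have hdl : (nodes.take (i + 1)).dropLast = nodes.take i := take_dropLast nodes i hle
        have hlast : (nodes.take (i + 1)).getLast hne = nodes.getD (i + 1 - 1) 0 := by
          rw [List.getLast_eq_getElem, List.getElem_take]
          rw [List.getD_eq_getElem _ _ (by simpa using hle)]
          congr 1
          simp
          omega
        rw [hdl, hlast]
        rw [getD_map_range' _ _ (j - 2) (by omega), getD_map_range' _ _ (j - 1) (by omega)]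
        have e1 : ((1 + (j - 2) : Nat) : Int) = (j : Int) - 1 := by omega
        have e2 : ((1 + (j - 1) : Nat) : Int) = (j : Int) := by omega
        rw [e2, e1]

-- ===== VERDICT (by name: the statement is the Claim_ definition above) =====
theorem generate_partition_configs_spec : Claim_equal_generate_partition_configs := by
  intro nodes k _ hpre
  unfold Spec_generate_partition_configs generate_partition_configs_alt
  rcases hpre with h1 | ⟨hk2, hkn⟩
  · subst h1
    rw [if_pos rfl, A_one]
  · have hk1 : k ≠ 1 := by omega
    rw [if_neg hk1]
    rw [row_inv nodes k hk2 nodes.length le_rfl]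
    have hmin : min nodes.length k.toNat = k.toNat := by omega
    rw [hmin]
    rw [getD_map_range' _ _ (k.toNat - 1) (by omega)]
    unfold pvCell
    have e : ((1 + (k.toNat - 1) : Nat) : Int) = k := by omega
    rw [e, List.take_length]
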